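-- pv_equiv track=rewrite | github.com/Charles94jp/github-md-toc | toc_generator.py | _generate_link
-- ===== SOURCE A (Python) =====
-- def _generate_link(title: str):
--     """
--     删除标题中的特殊字符
--
--     :param title:
--     :return:
--     """
--     title = title.lower().strip()
--     r = []
--     for s in title:
--         if s == '-' or s == '_':
--             r.append(s)
--             continue
--         if s == ' ':
--             r.append('-')
--             continue
--         i = ord(s)
--         if 32 < i < 48 or 57 < i < 65 or 90 < i < 97 or 122 < i < 127:
--             continue
--         r.append(s)
--     return ''.join(r)
-- ===== SOURCE B (Python) =====
-- # Staged passes: replace spaces, then loop over the punctuation ALPHABET,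
-- # removing each punctuation character with its own str.replace pass.
-- _PUNCT = '!"#$%&\'()*+,./:;<=>?@[\\]^`{|}~'
--
--
-- def _generate_link(title: str):
--     t = title.lower().strip().replace(' ', '-')
--     for ch in _PUNCT:
--         t = t.replace(ch, '')
--     return t
-- ===== Notes on version B (the rewrite author's own statement) =====
-- stated objective: faster
-- what changed: Instead of one Python-level loop over the title's characters with per-character range tests, B does staged whole-string passes: one space-to-hyphen replace and then a loop over the 30-character punctuation alphabet, deleting each punctuation character with its own str.replace pass.
import Mathlib
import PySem

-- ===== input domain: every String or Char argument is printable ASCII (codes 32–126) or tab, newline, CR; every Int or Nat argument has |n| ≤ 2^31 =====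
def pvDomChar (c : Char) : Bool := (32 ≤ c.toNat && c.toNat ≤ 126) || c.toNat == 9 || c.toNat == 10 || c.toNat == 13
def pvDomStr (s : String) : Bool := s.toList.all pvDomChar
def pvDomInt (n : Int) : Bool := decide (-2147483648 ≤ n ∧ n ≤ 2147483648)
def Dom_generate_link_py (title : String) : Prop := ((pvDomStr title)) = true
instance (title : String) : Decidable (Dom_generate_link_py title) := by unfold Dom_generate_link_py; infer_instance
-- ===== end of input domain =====

-- B replaces A's per-character branch/range-test loop by staged str.replace passes:
-- map spaces once, then loop over the punctuation ALPHABET removing each character (alternative decomposition).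


-- ===== PORT A =====
def generate_link_py (title : String) : String :=
  let t := PySem.Str.strip (PySem.Str.lower title)
  String.ofList (t.toList.foldl (fun r s =>
    if s = '-' ∨ s = '_' then r ++ [s]
    else if s = ' ' then r ++ ['-']
    else
      let i : Int := (s.toNat : Int)
      if (32 < i ∧ i < 48) ∨ (57 < i ∧ i < 65) ∨ (90 < i ∧ i < 97) ∨ (122 < i ∧ i < 127) then r
      else r ++ [s]) [])

-- ===== PORT B =====
-- _PUNCT = '!"#$%&\'()*+,./:;<=>?@[\\]^`{|}~'
def pvPunct : List Char := "!\"#$%&'()*+,./:;<=>?@[\\]^`{|}~".toList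

-- t = title.lower().strip().replace(' ', '-'); for ch in _PUNCT: t = t.replace(ch, '')
def generate_link_py_alt (title : String) : String :=
  let t0 := PySem.Chars.replace (PySem.Str.strip (PySem.Str.lower title)).toList [' '] ['-']
  String.ofList (pvPunct.foldl (fun t ch => PySem.Chars.replace t [ch] []) t0)

-- ===== PRECONDITION & SPEC =====
def Spec_generate_link_py (title : String) (out : String) : Prop := out = generate_link_py_alt title
instance (title : String) (out : String) : Decidable (Spec_generate_link_py title out) := by unfold Spec_generate_link_py; infer_instance

-- ===== CLAIM (what is proved, stated in full; the proofs are below) =====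
def Claim_equal_generate_link_py : Prop := ∀ (title : String), Dom_generate_link_py title → Spec_generate_link_py title (generate_link_py title)

-- ===== LEMMAS AND PROOFS =====

theorem pv_replace_go_singleton (a : Char) (new : List Char) (fuel : Nat) :
    ∀ (l acc : List Char), l.length ≤ fuel →
    PySem.Chars.replace.go [a] new fuel l acc =
      acc.reverse ++ l.flatMap (fun c => if c = a then new else [c]) := by
  induction fuel with
  | zero =>
    intro l acc h
    have : l = [] := List.eq_nil_of_length_eq_zero (Nat.le_zero.mp h)
    subst this; simp [PySem.Chars.replace.go]
  | succ n ih =>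
    intro l acc h
    cases l with
    | nil => simp [PySem.Chars.replace.go]
    | cons c t =>
      by_cases hc : c = a
      · subst hc
        have hpre : List.isPrefixOf [c] (c :: t) = true := by
          simp [List.isPrefixOf]
        simp only [PySem.Chars.replace.go, hpre, if_true, List.length_cons,
          List.length_nil, List.drop_succ_cons, List.drop_zero] at *
        rw [ih t (new.reverse ++ acc) (by omega)]
        simp [List.flatMap_cons]
      · have hpre : List.isPrefixOf [a] (c :: t) = false := by
          simp [List.isPrefixOf]
          exact fun h' => hc h'.symm
        simp only [PySem.Chars.replace.go, hpre, if_false, Bool.false_eq_true, List.length_cons] at *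
        rw [ih t (c :: acc) (by omega)]
        simp [List.flatMap_cons, hc]

theorem pv_replace_singleton (a : Char) (new s : List Char) :
    PySem.Chars.replace s [a] new = s.flatMap (fun c => if c = a then new else [c]) := by
  rw [PySem.Chars.replace]
  simp only [List.isEmpty_cons, Bool.false_eq_true, if_false]
  simpa using pv_replace_go_singleton a new s.length s [] (le_refl _)

theorem pv_replace_delete (a : Char) (s : List Char) :
    PySem.Chars.replace s [a] [] = s.filter (fun c => !(c == a)) := by
  rw [pv_replace_singleton]
  induction s with
  | nil => rfl
  | cons c t ih =>
    simp only [List.flatMap_cons, List.filter_cons, ih]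
    by_cases h : c = a <;> simp [h]

theorem pv_foldl_delete (ps : List Char) : ∀ (t : List Char),
    ps.foldl (fun t ch => PySem.Chars.replace t [ch] []) t =
      t.filter (fun c => !(ps.contains c)) := by
  induction ps with
  | nil => intro t; simp
  | cons p ps ih =>
    intro t
    rw [List.foldl_cons, pv_replace_delete, ih, List.filter_filter]
    apply List.filter_congr
    intro c _
    by_cases h : c = p <;> by_cases h2 : c ∈ ps <;> simp [List.mem_cons, h, h2]

theorem pv_char_eq_iff_toNat (c d : Char) : c = d ↔ c.toNat = d.toNat := by
  constructor
  · intro h; rw [h]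
  · intro h; rw [← Char.ofNat_toNat c, h, Char.ofNat_toNat]

-- the per-character effect of A's loop body, as a list-valued function
def pvStepA (s : Char) : List Char :=
  if s = '-' ∨ s = '_' then [s]
  else if s = ' ' then ['-']
  else
    let i : Int := (s.toNat : Int)
    if (32 < i ∧ i < 48) ∨ (57 < i ∧ i < 65) ∨ (90 < i ∧ i < 97) ∨ (122 < i ∧ i < 127) then []
    else [s]

theorem pv_stepA_eq (c : Char) :
    pvStepA c = if pvPunct.contains (if c = ' ' then '-' else c) = true then []
                else [if c = ' ' then '-' else c] := by
  by_cases hd : c = '-'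
  · subst hd; decide
  by_cases hu : c = '_'
  · subst hu; decide
  by_cases hsp : c = ' '
  · subst hsp; decide
  have h45 : c.toNat ≠ 45 := fun h => hd ((pv_char_eq_iff_toNat c '-').mpr h)
  have h95 : c.toNat ≠ 95 := fun h => hu ((pv_char_eq_iff_toNat c '_').mpr h)
  have h32 : c.toNat ≠ 32 := fun h => hsp ((pv_char_eq_iff_toNat c ' ').mpr h)
  have hmem : pvPunct.contains c = true ↔
      (33 ≤ c.toNat ∧ c.toNat ≤ 44) ∨ c.toNat = 46 ∨ c.toNat = 47 ∨
      (58 ≤ c.toNat ∧ c.toNat ≤ 64) ∨ (91 ≤ c.toNat ∧ c.toNat ≤ 94) ∨ c.toNat = 96 ∨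
      (123 ≤ c.toNat ∧ c.toNat ≤ 126) := by
    simp only [pvPunct, List.contains_eq_mem, decide_eq_true_eq]
    show c ∈ ['!', '"', '#', '$', '%', '&', '\'', '(', ')', '*', '+', ',', '.', '/',
              ':', ';', '<', '=', '>', '?', '@', '[', '\\', ']', '^', '`',
              '{', '|', '}', '~'] ↔ _
    simp only [List.mem_cons, List.not_mem_nil, or_false]
    constructor
    · rintro (h | h | h | h | h | h | h | h | h | h | h | h | h | h | h | h | h | h |
              h | h | h | h | h | h | h | h | h | h | h | h) <;>
        (subst h; decide)
    · intro h
      simp only [pv_char_eq_iff_toNat]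
      show c.toNat = 33 ∨ c.toNat = 34 ∨ c.toNat = 35 ∨ c.toNat = 36 ∨ c.toNat = 37 ∨
        c.toNat = 38 ∨ c.toNat = 39 ∨ c.toNat = 40 ∨ c.toNat = 41 ∨ c.toNat = 42 ∨
        c.toNat = 43 ∨ c.toNat = 44 ∨ c.toNat = 46 ∨ c.toNat = 47 ∨ c.toNat = 58 ∨
        c.toNat = 59 ∨ c.toNat = 60 ∨ c.toNat = 61 ∨ c.toNat = 62 ∨ c.toNat = 63 ∨
        c.toNat = 64 ∨ c.toNat = 91 ∨ c.toNat = 92 ∨ c.toNat = 93 ∨ c.toNat = 94 ∨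
        c.toNat = 96 ∨ c.toNat = 123 ∨ c.toNat = 124 ∨ c.toNat = 125 ∨ c.toNat = 126
      omega
  rw [if_neg hsp]
  unfold pvStepA
  rw [if_neg (by simp [hd, hu]), if_neg hsp]
  by_cases hdel : pvPunct.contains c = true
  · rw [if_pos hdel]
    rw [hmem] at hdel
    rw [if_pos (by omega)]
  · rw [if_neg hdel]
    rw [hmem] at hdel
    push Not at hdel
    rw [if_neg (by omega)]

theorem pv_flat (cs : List Char) :
    cs.flatMap pvStepA =
      List.map (fun c => if c = ' ' then '-' else c)
        (List.filter ((fun c => !pvPunct.contains c) ∘ fun c => if c = ' ' then '-' else c) cs) := by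
  induction cs with
  | nil => rfl
  | cons c t ih =>
    simp only [List.flatMap_cons, List.filter_cons, Function.comp_apply, pv_stepA_eq c, ih]
    split_ifs <;> simp_all

theorem pv_main (cs : List Char) :
    cs.foldl (fun r s =>
      if s = '-' ∨ s = '_' then r ++ [s]
      else if s = ' ' then r ++ ['-']
      else
        let i : Int := (s.toNat : Int)
        if (32 < i ∧ i < 48) ∨ (57 < i ∧ i < 65) ∨ (90 < i ∧ i < 97) ∨ (122 < i ∧ i < 127) then r
        else r ++ [s]) [] =
    pvPunct.foldl (fun t ch => PySem.Chars.replace t [ch] [])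
      (PySem.Chars.replace cs [' '] ['-']) := by
  have hstep : (fun r s =>
      if s = '-' ∨ s = '_' then r ++ [s]
      else if s = ' ' then r ++ ['-']
      else
        let i : Int := (s.toNat : Int)
        if (32 < i ∧ i < 48) ∨ (57 < i ∧ i < 65) ∨ (90 < i ∧ i < 97) ∨ (122 < i ∧ i < 127) then r
        else r ++ [s] : List Char → Char → List Char) = fun r s => r ++ pvStepA s := by
    funext r s
    simp only [pvStepA]
    split_ifs <;> simp
  have hmap : PySem.Chars.replace cs [' '] ['-'] = cs.map (fun c => if c = ' ' then '-' else c) := by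
    rw [pv_replace_singleton]
    induction cs with
    | nil => rfl
    | cons c t ih => by_cases h : c = ' ' <;> simp [List.flatMap_cons, h, ih]
  rw [hstep, PySem.List.foldl_append_eq_flatMap, List.nil_append, pv_foldl_delete, hmap,
    List.filter_map]
  exact pv_flat cs

-- ===== VERDICT (by name: the statement is the Claim_ definition above) =====
theorem generate_link_py_spec : Claim_equal_generate_link_py := by
  intro title _
  show generate_link_py title = generate_link_py_alt title
  unfold generate_link_py generate_link_py_alt
  exact congrArg String.ofList (pv_main _)
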